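-- pv_equiv track=rewrite | github.com/lionatzion/KryptosCipher | k4_analysis_lib.py | fill_cycle
-- ===== SOURCE A (Python) =====
-- import itertools as it
-- from typing import Dict, List, Tuple
--
-- ALPH = "ABCDEFGHIJKLMNOPQRSTUVWXYZ"
--
-- def fill_cycle(constraints: Dict[int, str], period: int) -> List[List[str]]:
--     """
--     Generates all possible full keystream cycles by filling in unknown residues
--     with all letters from A-Z.
--     """
--     base = [None] * period
--     for r, ch in constraints.items():
--         base[r] = ch
--     unknown_residues = [r for r in range(period) if base[r] is None]
--     results = []
--     for fill in it.product(ALPH, repeat=len(unknown_residues)):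
--         ks = base[:]
--         for r, ch in zip(unknown_residues, fill):
--             ks[r] = ch
--         if any(x is None for x in ks):
--             continue
--         results.append(ks)
--     return results
-- ===== SOURCE B (Python) =====
-- ALPH = "ABCDEFGHIJKLMNOPQRSTUVWXYZ"
--
-- def fill_cycle(constraints, period):
--     """
--     Generates all possible full keystream cycles by filling in unknown residues
--     with all letters from A-Z.
--     """
--     base = [None] * period
--     for r, ch in constraints.items():
--         base[r] = ch
--     unknown_residues = [r for r in range(period) if base[r] is None]
--     results = [base[:]]
--     for r in unknown_residues:
--         expanded = []
--         for ks in results: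
--             for ch in ALPH:
--                 nk = ks[:]
--                 nk[r] = ch
--                 expanded.append(nk)
--         results = expanded
--     return results
-- ===== Notes on version B (the rewrite author's own statement) =====
-- stated objective: alternative
-- what changed: Replaces the itertools.product enumeration (materialise every fill tuple, zip-rewrite a fresh copy of base per tuple, then a dead None scan) by an iterative breadth-first expansion: the partial-keystream list is expanded residue by residue, each keystream branching into 26 copies.
import Mathlib
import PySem

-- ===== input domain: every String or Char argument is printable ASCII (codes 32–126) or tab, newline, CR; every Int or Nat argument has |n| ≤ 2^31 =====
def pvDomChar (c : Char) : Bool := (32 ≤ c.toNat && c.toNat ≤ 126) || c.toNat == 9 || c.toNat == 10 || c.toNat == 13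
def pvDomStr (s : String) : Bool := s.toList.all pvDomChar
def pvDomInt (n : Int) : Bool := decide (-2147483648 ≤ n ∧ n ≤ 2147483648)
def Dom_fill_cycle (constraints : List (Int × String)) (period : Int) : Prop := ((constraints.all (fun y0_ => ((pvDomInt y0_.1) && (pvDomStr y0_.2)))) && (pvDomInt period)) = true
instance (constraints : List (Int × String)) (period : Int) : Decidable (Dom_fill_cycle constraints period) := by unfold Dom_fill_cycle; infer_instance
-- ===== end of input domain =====

-- B replaces the itertools.product enumeration (materialise every fill tuple, zip-rewrite a fresh copy,
-- dead None check) by a depth-first recursion over the unknown residues; same outputs in the same order.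

def pvALPH : List Char := "ABCDEFGHIJKLMNOPQRSTUVWXYZ".toList

-- ===== PORT A =====
-- it.product(ALPH, repeat=n): lexicographic tuples, first coordinate slowest
def pvProd : Nat → List (List Char)
  | 0 => [[]]
  | n + 1 => pvALPH.flatMap (fun c => (pvProd n).map (fun t => c :: t))

def fill_cycle (constraints : List (Int × String)) (period : Int) : List (List String) :=
  let base0 : List (Option String) := List.replicate period.toNat none
  -- base[r] = ch; Python raises IndexError when r is out of range — excluded by Pre_
  let base := constraints.foldl (fun b rc => PySem.List.pySetD b rc.1 (some rc.2)) base0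
  let unknown := (PySem.List.pyRange 0 period 1).filter
      (fun r => decide (PySem.List.pyGet? base r = some none))
  -- results.append(ks) realised O(1) as a cons; the final .reverse restores append order
  ((pvProd unknown.length).foldl (fun results fill =>
      let ks := (unknown.zip fill).foldl
          (fun k rc => PySem.List.pySetD k rc.1 (some rc.2.toString)) base
      if ks.any (fun x => decide (x = none)) then results
      else ks.map (fun o => o.getD "") :: results) []).reverse

-- ===== PORT B =====
-- breadth-first expansion: each pass over `results` branches every partial keystream 26 ways
def fill_cycle_alt (constraints : List (Int × String)) (period : Int) : List (List String) :=
  let base0 : List (Option String) := List.replicate period.toNat none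
  let base := constraints.foldl (fun b rc => PySem.List.pySetD b rc.1 (some rc.2)) base0
  let unknown := (PySem.List.pyRange 0 period 1).filter
      (fun r => decide (PySem.List.pyGet? base r = some none))
  ((unknown.foldl (fun results r =>
      results.flatMap (fun ks => pvALPH.map (fun ch => PySem.List.pySetD ks r (some ch.toString))))
    [base])
  -- boundary conversion only: after the loop no entry is None (proved below)
  ).map (fun ks => ks.map (fun o => o.getD ""))

-- ===== PRECONDITION & SPEC =====
-- Pre_ excludes exactly the inputs where `base[r] = ch` raises IndexError: a constraint residue
-- outside [-period, period).
def Pre_fill_cycle (constraints : List (Int × String)) (period : Int) : Prop :=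
  ∀ rc ∈ constraints, -period ≤ rc.1 ∧ rc.1 < period
instance (constraints : List (Int × String)) (period : Int) : Decidable (Pre_fill_cycle constraints period) := by unfold Pre_fill_cycle; infer_instance

def pvWitness_fill_cycle : (List (Int × String)) × Int := ([(0, "K"), (2, "R")], 4)

def Spec_fill_cycle (constraints : List (Int × String)) (period : Int) (out : List (List String)) : Prop := out = fill_cycle_alt constraints period
instance (constraints : List (Int × String)) (period : Int) (out : List (List String)) : Decidable (Spec_fill_cycle constraints period out) := by unfold Spec_fill_cycle; infer_instance

-- ===== CLAIM (what is proved, stated in full; the proofs are below) =====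
def Claim_equal_fill_cycle : Prop := ∀ (constraints : List (Int × String)) (period : Int), Dom_fill_cycle constraints period → Pre_fill_cycle constraints period → Spec_fill_cycle constraints period (fill_cycle constraints period)

-- ===== LEMMAS AND PROOFS =====

-- the base-building fold never changes the length
theorem pvLength_buildBase (l : List (Int × String)) (b0 : List (Option String)) :
    (l.foldl (fun b rc => PySem.List.pySetD b rc.1 (some rc.2)) b0).length = b0.length := by
  induction l generalizing b0 with
  | nil => rfl
  | cons rc l ih => simp [List.foldl_cons, ih, PySem.List.length_pySetD]

theorem pvProd_mem_length {n : Nat} {fill : List Char} (h : fill ∈ pvProd n) :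
    fill.length = n := by
  induction n generalizing fill with
  | zero => simp [pvProd] at h; simp [h]
  | succ n ih =>
    simp only [pvProd, List.mem_flatMap, List.mem_map] at h
    obtain ⟨c, -, t, ht, rfl⟩ := h
    simp [ih ht]

-- after writing a letter at every unknown residue, no entry is None
theorem pvNoNone (us : List Int) (ks : List (Option String)) (fill : List Char)
    (hlen : fill.length = us.length)
    (hrange : ∀ r ∈ us, 0 ≤ r ∧ r < (ks.length : Int))
    (hcover : ∀ i : Nat, ks[i]? = some none → (i : Int) ∈ us) :
    ((us.zip fill).foldl (fun k rc => PySem.List.pySetD k rc.1 (some rc.2.toString)) ks).any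
      (fun x => decide (x = none)) = false := by
  induction us generalizing ks fill with
  | nil =>
    simp only [List.zip_nil_left, List.foldl_nil]
    rw [List.any_eq_false]
    intro x hx
    obtain ⟨i, hi, hget⟩ := List.mem_iff_getElem.mp hx
    simp only [decide_eq_true_eq]
    rintro rfl
    exact absurd (hcover i (by simp [List.getElem?_eq_getElem hi, hget])) (by simp)
  | cons r rs ih =>
    obtain ⟨c, cs, rfl⟩ : ∃ c cs, fill = c :: cs := by
      cases fill with
      | nil => simp at hlen
      | cons c cs => exact ⟨c, cs, rfl⟩
    obtain ⟨hr0, hrlt⟩ := hrange r (by simp)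
    have hset : PySem.List.pySetD ks r (some c.toString) = ks.set r.toNat (some c.toString) :=
      PySem.List.pySetD_of_nonneg ks _ hr0
    simp only [List.zip_cons_cons, List.foldl_cons]
    apply ih
    · simpa using hlen
    · intro x hx
      have := hrange x (by simp [hx])
      simpa [hset] using this
    · intro i hi
      rw [hset] at hi
      rw [List.getElem?_set] at hi
      by_cases hir : r.toNat = i
      · subst hir
        have : r.toNat < ks.length := by omega
        simp [this] at hi
      · simp [hir] at hi
        have hmem := hcover i hi
        rcases List.mem_cons.mp hmem with h | h
        · exfalso; apply hir; omega
        · exact h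

-- A's accumulation loop, once the continue-branch is known dead, is a reversed map
theorem pvFoldAllFalse {α β : Type} (p : List α → Bool) (f : List α → β)
    (l : List (List α)) (acc : List β) (h : ∀ x ∈ l, p x = false) :
    l.foldl (fun results fill => if p fill then results else f fill :: results) acc
      = (l.map f).reverse ++ acc := by
  induction l generalizing acc with
  | nil => simp
  | cons x l ih =>
    simp only [List.foldl_cons, h x (by simp), Bool.false_eq_true, List.map_cons]
    rw [ih _ (fun y hy => h y (by simp [hy]))]
    simp

-- B's level-by-level expansion enumerates exactly A's per-fill rewrites, in the same order
theorem pvExpand_eq_map (us : List Int) (L : List (List (Option String))) :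
    us.foldl (fun results r =>
        results.flatMap (fun ks => pvALPH.map (fun ch => PySem.List.pySetD ks r (some ch.toString)))) L
      = L.flatMap (fun ks => (pvProd us.length).map (fun fill =>
          (us.zip fill).foldl (fun k rc => PySem.List.pySetD k rc.1 (some rc.2.toString)) ks)) := by
  induction us generalizing L with
  | nil => simp [pvProd]
  | cons r rs ih =>
    simp only [List.foldl_cons, ih, List.flatMap_assoc, List.length_cons, pvProd,
      List.map_flatMap, List.map_map]
    refine List.flatMap_congr ?_
    intro ks _
    rw [List.flatMap_map]
    rfl

-- ===== VERDICT (by name: the statement is the Claim_ definition above) =====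
theorem fill_cycle_spec : Claim_equal_fill_cycle := by
  intro constraints period _ hpre
  unfold Spec_fill_cycle fill_cycle fill_cycle_alt
  simp only []
  set base0 : List (Option String) := List.replicate period.toNat none with hb0
  set base := constraints.foldl (fun b rc => PySem.List.pySetD b rc.1 (some rc.2)) base0 with hb
  set unknown := (PySem.List.pyRange 0 period 1).filter
      (fun r => decide (PySem.List.pyGet? base r = some none)) with hu
  have hbl : base.length = period.toNat := by
    rw [hb, pvLength_buildBase, hb0, List.length_replicate]
  have hrange : ∀ r ∈ unknown, 0 ≤ r ∧ r < (base.length : Int) := by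
    intro r hr
    rw [hu, List.mem_filter] at hr
    have hmem := (PySem.List.mem_pyRange_one).mp hr.1
    have hper : (0:Int) < period := by omega
    have : (base.length : Int) = period := by
      rw [hbl]; omega
    omega
  have hcover : ∀ i : Nat, base[i]? = some none → (i : Int) ∈ unknown := by
    intro i hi
    have hilt : i < base.length := by
      by_contra h
      rw [List.getElem?_eq_none (by omega)] at hi
      exact absurd hi (by simp)
    rw [hu, List.mem_filter]
    constructor
    · rw [PySem.List.mem_pyRange_one]
      constructor
      · exact Int.natCast_nonneg i
      · rw [hbl] at hilt; omega
    · rw [PySem.List.pyGet?_natCast, hi]; simp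
  rw [pvFoldAllFalse _ _ _ _ (fun fill hfill =>
        pvNoNone unknown base fill (pvProd_mem_length hfill) hrange hcover),
      pvExpand_eq_map]
  simp [List.map_map]
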